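-- pv_equiv track=rewrite | github.com/muhammadaljuburi2007-hub/first-project | main-with-gui.py | decros
-- ===== SOURCE A (Python) =====
-- decr = {"30": 'a', "87": 'b', "67": 'c', "65": 'd', "63": 'e', "58": 'f', "56": 'g', "54": 'h', "52": 'i',
--         "50": 'j', "49": 'k', "47": 'l', "45": 'm', "43": 'n', "41": 'o', "38": 'p', "36": 'q', "34": 'r',
--         "32": 's', "31": 't', "29": 'u', "27": 'v', "25": 'w', "23": 'x', "21": 'y', "18": 'z', "16": ' ',
--         "14": '?', "12": '.', "10": '!', "09": '0', "07": '1', "05": '2', "03": '3', "01": '4', "02": '5',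
--         "04": '6', "06": '7', "08": '8', "11": '9'}
--
-- def decros(decr, text):
--     ll = 0
--     mm = ""
--     nn = ""
--
--     for i in text:
--         ll = ll + 1
--         l = ll % 2
--         if l == 0:
--             nn = nn + i
--             try:
--                 xx = decr[nn]
--                 mm = mm + xx
--                 nn = ""  # Reset nn after successful decoding
--             except KeyError:
--                 # If not a valid code, keep the original characters
--                 mm = mm + nn
--                 nn = i
--         elif l != 0:
--             nn = i
--
--     # Handle any remaining characters
--     if nn and nn in decr:
--         mm = mm + decr[nn]
--     elif nn:
--         mm = mm + nn
--
--     return mm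
-- ===== SOURCE B (Python) =====
-- def decros(decr, text):
--     # Decode two-character slices; a slice that is not a code is copied
--     # through and its second character stays pending, to be decoded (or
--     # copied) on its own once the text ends.
--     out = []
--     pending = ""
--     for i in range(0, len(text), 2):
--         pair = text[i:i+2]
--         if pair in decr:
--             out.append(decr[pair])
--             pending = ""
--         elif len(pair) == 2:
--             out.append(pair)
--             pending = pair[1:]
--         else:
--             out.append(pair)
--             pending = ""
--     if pending:
--         out.append(decr.get(pending, pending))
--     return "".join(out)
-- ===== Notes on version B (the rewrite author's own statement) =====
-- stated objective: faster
-- what changed: B replaces the per-character loop with its parity counter, stateful one-or-two-char buffer and try/except by a single loop over fixed two-character slices with dict membership tests, keeping only the second character of an unrecognized pair pending for the end-of-text flush, and collects the pieces in a list joined once instead of repeated string concatenation.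
import Mathlib
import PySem

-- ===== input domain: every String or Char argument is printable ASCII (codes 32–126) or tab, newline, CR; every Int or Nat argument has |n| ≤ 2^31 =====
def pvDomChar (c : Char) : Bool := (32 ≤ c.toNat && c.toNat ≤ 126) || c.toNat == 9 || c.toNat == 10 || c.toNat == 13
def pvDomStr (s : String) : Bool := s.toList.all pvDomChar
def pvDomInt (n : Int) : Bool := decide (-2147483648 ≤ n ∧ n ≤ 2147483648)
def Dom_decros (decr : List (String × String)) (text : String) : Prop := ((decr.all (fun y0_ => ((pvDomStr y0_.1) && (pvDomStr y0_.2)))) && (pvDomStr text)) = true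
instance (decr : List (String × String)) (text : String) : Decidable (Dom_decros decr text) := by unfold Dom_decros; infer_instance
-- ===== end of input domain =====

-- B replaces A's per-character loop with its parity counter, stateful buffer and try/except by a
-- single loop over two-character slices with dict membership tests, collecting pieces in a list
-- joined once (objective: faster by a constant factor).

-- ===== PORT A =====
-- one iteration of A's `for i in text` loop; state = (ll, mm, nn)
def decrosStep (d : PySem.Dict String String) (s : Int × String × String) (i : Char) : Int × String × String :=
  let ll := s.1 + 1
  let mm := s.2.1
  let nn := s.2.2
  let l := PySem.Int.mod ll 2
  if l == 0 then
    let nn2 := nn ++ String.singleton i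
    match PySem.Dict.get? d nn2 with
    | some xx => (ll, mm ++ xx, "")
    | none   => (ll, mm ++ nn2, String.singleton i)
  else (ll, mm, String.singleton i)

-- A's trailing `if nn and nn in decr: … elif nn: …`
def decrosFin (d : PySem.Dict String String) (s : Int × String × String) : String :=
  let mm := s.2.1
  let nn := s.2.2
  if nn ≠ "" then
    match PySem.Dict.get? d nn with
    | some v => mm ++ v
    | none   => mm ++ nn
  else mm

def decros (decr : List (String × String)) (text : String) : String :=
  let d := PySem.Dict.ofList decr
  decrosFin d (text.toList.foldl (decrosStep d) (0, "", ""))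

-- ===== PORT B =====
-- one iteration of B's `for i in range(0, len(text), 2)` loop; state = (out, pending)
def decrosAltStep (d : PySem.Dict String String) (text : String) (s : List String × String) (i : Int) : List String × String :=
  let pair := PySem.Str.slice text (some i) (some (i + 2))
  match PySem.Dict.get? d pair with
  | some v => (s.1 ++ [v], "")
  | none =>
    if PySem.Str.len pair == 2 then (s.1 ++ [pair], PySem.Str.slice pair (some 1) none)
    else (s.1 ++ [pair], "")

-- B's trailing `if pending: out.append(decr.get(pending, pending))` followed by the join
def decrosAltFin (d : PySem.Dict String String) (s : List String × String) : String :=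
  let out := if s.2 ≠ "" then s.1 ++ [PySem.Dict.getD d s.2 s.2] else s.1
  PySem.Str.join "" out

def decros_alt (decr : List (String × String)) (text : String) : String :=
  let d := PySem.Dict.ofList decr
  decrosAltFin d ((PySem.List.pyRange 0 (PySem.Str.len text) 2).foldl (decrosAltStep d text) ([], ""))

-- ===== PRECONDITION & SPEC =====
def Spec_decros (decr : List (String × String)) (text : String) (out : String) : Prop := out = decros_alt decr text
instance (decr : List (String × String)) (text : String) (out : String) : Decidable (Spec_decros decr text out) := by unfold Spec_decros; infer_instance

-- ===== CLAIM (what is proved, stated in full; the proofs are below) =====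
def Claim_equal_decros : Prop := ∀ (decr : List (String × String)) (text : String), Dom_decros decr text → Spec_decros decr text (decros decr text)

-- ===== LEMMAS AND PROOFS =====

-- the token a two-character (or trailing one-character) block decodes to
def dTok (d : PySem.Dict String String) (s : String) : List Char :=
  match PySem.Dict.get? d s with
  | some v => v.toList
  | none   => s.toList

-- the final flush of a pending buffer
def dFlush (d : PySem.Dict String String) (nn : String) : List Char :=
  if nn = "" then [] else dTok d nn

-- the common two-characters-at-a-time semantics, carrying the pending buffer
def dAuxA (d : PySem.Dict String String) : List Char → String → List Char
  | [], nn => dFlush d nn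
  | [a], _ => dTok d (String.ofList [a])
  | a :: b :: r, _ =>
    match PySem.Dict.get? d (String.ofList [a, b]) with
    | some v => v.toList ++ dAuxA d r ""
    | none   => [a, b] ++ dAuxA d r (String.singleton b)

theorem foldA_eq (d : PySem.Dict String String) :
    ∀ (l : List Char) (k : Int), k % 2 = 0 → ∀ (mm nn : String),
      (decrosFin d (l.foldl (decrosStep d) (k, mm, nn))).toList = mm.toList ++ dAuxA d l nn
  | [], k, hk, mm, nn => by
    by_cases h : nn = ""
    · simp [decrosFin, dAuxA, dFlush, h]
    · simp only [List.foldl_nil, decrosFin, dAuxA, dFlush, dTok, if_neg h]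
      cases PySem.Dict.get? d nn <;> simp [h]
  | [a], k, hk, mm, nn => by
    have hmod : PySem.Int.mod (k + 1) 2 = 1 := by
      rw [PySem.Int.mod_eq_emod_of_pos (by norm_num)]; omega
    simp only [List.foldl_cons, List.foldl_nil, decrosStep, hmod]
    simp only [show ((1 : Int) == 0) = false by decide, Bool.false_eq_true, if_false]
    simp only [decrosFin, dAuxA, String.singleton_eq_ofList, dTok]
    cases PySem.Dict.get? d (String.ofList [a]) <;> simp
  | a :: b :: r, k, hk, mm, nn => by
    have hmod : PySem.Int.mod (k + 1) 2 = 1 := by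
      rw [PySem.Int.mod_eq_emod_of_pos (by norm_num)]; omega
    have hmod2 : PySem.Int.mod (k + 1 + 1) 2 = 0 := by
      rw [PySem.Int.mod_eq_emod_of_pos (by norm_num)]; omega
    have hpair : String.singleton a ++ String.singleton b = String.ofList [a, b] := by
      apply String.toList_inj.mp; simp
    have hk2 : (k + 1 + 1) % 2 = 0 := by omega
    simp only [List.foldl_cons, decrosStep, hmod]
    simp only [show ((1 : Int) == 0) = false by decide, Bool.false_eq_true, if_false]
    simp only [hmod2, show ((0 : Int) == 0) = true by decide, if_true, hpair]
    cases hg : PySem.Dict.get? d (String.ofList [a, b]) with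
    | some v =>
      rw [foldA_eq d r (k + 1 + 1) hk2 (mm ++ v) ""]
      simp [dAuxA, hg]
    | none =>
      rw [foldA_eq d r (k + 1 + 1) hk2 (mm ++ String.ofList [a, b]) (String.singleton b)]
      simp [dAuxA, hg]

theorem join_empty_toList (rs : List String) :
    (PySem.Str.join "" rs).toList = (rs.map String.toList).flatten := by
  rw [PySem.Str.toList_join]
  show PySem.Chars.join "".toList _ = _
  rw [show "".toList = [] from rfl]
  unfold PySem.Chars.join
  induction (rs.map String.toList) with
  | nil => simp [List.intercalate]
  | cons p ps ih => cases ps <;> simp_all [List.intercalate]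

theorem pyRange_two_nil (a b : Int) (h : b ≤ a) : PySem.List.pyRange a b 2 = [] := by
  rw [PySem.List.pyRange_of_pos _ _ (by norm_num : (0:Int) < 2)]
  simp [show ¬ (a < b) by omega]

theorem pyRange_two_cons (a b : Int) (h : a < b) :
    PySem.List.pyRange a b 2 = a :: PySem.List.pyRange (a + 2) b 2 := by
  rw [PySem.List.pyRange_of_pos _ _ (by norm_num : (0:Int) < 2),
      PySem.List.pyRange_of_pos _ _ (by norm_num : (0:Int) < 2)]
  have hc : ((b - a + 2 - 1) / 2).toNat = ((b - (a + 2) + 2 - 1) / 2).toNat + 1 := by omega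
  by_cases h2 : a + 2 < b
  · simp only [if_pos h, if_pos h2, hc, List.range_succ_eq_map]
    simp [List.map_map, Function.comp]
    intro k _; ring
  · have h0 : ((b - (a + 2) + 2 - 1) / 2).toNat = 0 := by omega
    simp only [if_pos h, if_neg h2, hc, h0, List.range_succ_eq_map]
    simp

theorem toList_getD_self (d : PySem.Dict String String) (s : String) :
    (PySem.Dict.getD d s s).toList = dTok d s := by
  rw [PySem.Dict.getD_eq_get?_getD]
  unfold dTok
  cases PySem.Dict.get? d s <;> simp

theorem chunk_eq (text : String) (j : Nat) :
    PySem.Str.slice text (some (j : Int)) (some ((j : Int) + 2)) =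
      String.ofList ((text.toList.drop j).take 2) := by
  apply String.toList_inj.mp
  rw [PySem.Str.toList_slice]
  have := PySem.List.slice_natCast_add (xs := text.toList) (j := j) (n := 2)
  push_cast at this
  simpa [PySem.Chars.slice] using this

theorem pair_second (a b : Char) :
    PySem.Str.slice (String.ofList [a, b]) (some 1) none = String.singleton b := by
  apply String.toList_inj.mp
  rw [PySem.Str.toList_slice]
  simpa [PySem.Chars.slice] using PySem.List.slice_from (xs := [a, b]) (a := 1)

theorem foldB_eq (decr : List (String × String)) (text : String) :
    ∀ (j : Nat) (res : List String) (p : String),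
      (decrosAltFin (PySem.Dict.ofList decr)
          ((PySem.List.pyRange (j : Int) (PySem.Str.len text) 2).foldl
            (decrosAltStep (PySem.Dict.ofList decr) text) (res, p))).toList =
        (res.map String.toList).flatten ++ dAuxA (PySem.Dict.ofList decr) (text.toList.drop j) p
  | j, res, p => by
    have hlen0 : PySem.Str.len text = (text.toList.length : Int) := by
      simp [PySem.Str.len, String.length_toList]
    by_cases hj : text.toList.length ≤ j
    · rw [pyRange_two_nil _ _ (by rw [hlen0]; omega)]
      simp only [List.foldl_nil, List.drop_eq_nil_of_le hj, dAuxA, decrosAltFin]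
      by_cases hp : p = ""
      · rw [if_neg (by simp [hp]), join_empty_toList]
        simp [dFlush, hp]
      · rw [if_pos (by simpa using hp), join_empty_toList]
        simp [dFlush, hp, toList_getD_self]
    · rw [not_le] at hj
      rw [pyRange_two_cons _ _ (by rw [hlen0]; omega), List.foldl_cons]
      have hstep0 : PySem.Str.slice text (some (j : Int)) (some ((j : Int) + 2)) =
          String.ofList ((text.toList.drop j).take 2) := chunk_eq text j
      have hcast : ((j : Int) + 2) = ((j + 2 : Nat) : Int) := by push_cast; ring
      have hdrop : text.toList.drop (j + 2) = (text.toList.drop j).drop 2 := by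
        rw [List.drop_drop]
      cases hd : text.toList.drop j with
      | nil => exact absurd (List.drop_eq_nil_iff.mp hd) (by omega)
      | cons a t =>
        cases t with
        | nil =>
          -- final single character
          have hchunk : PySem.Str.slice text (some (j : Int)) (some ((j : Int) + 2)) =
              String.ofList [a] := by rw [hstep0, hd]; rfl
          simp only [decrosAltStep, hchunk]
          cases hg : PySem.Dict.get? (PySem.Dict.ofList decr) (String.ofList [a]) with
          | some v =>
            rw [hcast, foldB_eq decr text (j + 2) (res ++ [v]) ""]
            rw [hdrop, hd]
            simp [dAuxA, dFlush, dTok, hg]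
          | none =>
            rw [if_neg (by simp)]
            rw [hcast, foldB_eq decr text (j + 2) (res ++ [String.ofList [a]]) ""]
            rw [hdrop, hd]
            simp [dAuxA, dFlush, dTok, hg]
        | cons b r =>
          have hchunk : PySem.Str.slice text (some (j : Int)) (some ((j : Int) + 2)) =
              String.ofList [a, b] := by rw [hstep0, hd]; rfl
          simp only [decrosAltStep, hchunk]
          cases hg : PySem.Dict.get? (PySem.Dict.ofList decr) (String.ofList [a, b]) with
          | some v =>
            rw [hcast, foldB_eq decr text (j + 2) (res ++ [v]) ""]
            rw [hdrop, hd]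
            simp [dAuxA, hg]
          | none =>
            rw [if_pos (by simp), pair_second]
            rw [hcast, foldB_eq decr text (j + 2) (res ++ [String.ofList [a, b]]) (String.singleton b)]
            rw [hdrop, hd]
            simp [dAuxA, hg]
  termination_by j _ _ => text.toList.length - j
  decreasing_by all_goals omega

-- ===== VERDICT (by name: the statement is the Claim_ definition above) =====
set_option maxHeartbeats 1000000 in
theorem decros_spec : Claim_equal_decros := by
  intro decr text _
  show decros decr text = decros_alt decr text
  apply String.toList_inj.mp
  simp only [decros, decros_alt]
  rw [foldA_eq (PySem.Dict.ofList decr) text.toList 0 (by norm_num) "" ""]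
  have h := foldB_eq decr text 0 [] ""
  simp only [Nat.cast_zero, List.drop_zero, List.map_nil, List.flatten_nil,
    List.nil_append] at h
  rw [h]
  simp
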